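-- pv_equiv track=rewrite | github.com/zfifteen/z-band-prime-prefilter | benchmarks/python/prime_inference_generator/boundary_certificate_graph_abstention_analysis.py | primary_missing_relation
-- ===== SOURCE A (Python) =====
-- def primary_missing_relation(patterns: list[str]) -> str:
--     """Return one deterministic primary missing-relation pattern."""
--     priority = (
--         "NEED_LARGER_CANDIDATE_BOUND",
--         "NEED_TRUE_BOUNDARY_CLOSURE",
--         "NEED_MULTI_HOLE_CLOSURE",
--         "NEED_UNRESOLVED_LATER_DOMINATION",
--         "NEED_POST_BOUNDARY_ABSORPTION",
--         "NEED_FALSE_RESOLVED_SURVIVOR_REJECTION",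
--         "NEED_RESET_DISCRIMINATOR",
--         "NEED_CARRIER_LOCK_EXTENSION",
--         "NEED_HIGHER_DIVISOR_LOCK_EXTENSION",
--         "NEED_PREVIOUS_CHAMBER_MEMORY",
--         "UNKNOWN",
--     )
--     for pattern in priority:
--         if pattern in patterns:
--             return pattern
--     return "UNKNOWN"
-- ===== SOURCE B (Python) =====
-- def primary_missing_relation(patterns: list[str]) -> str:
--     """Return one deterministic primary missing-relation pattern."""
--     priority = (
--         "NEED_LARGER_CANDIDATE_BOUND",
--         "NEED_TRUE_BOUNDARY_CLOSURE",
--         "NEED_MULTI_HOLE_CLOSURE",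
--         "NEED_UNRESOLVED_LATER_DOMINATION",
--         "NEED_POST_BOUNDARY_ABSORPTION",
--         "NEED_FALSE_RESOLVED_SURVIVOR_REJECTION",
--         "NEED_RESET_DISCRIMINATOR",
--         "NEED_CARRIER_LOCK_EXTENSION",
--         "NEED_HIGHER_DIVISOR_LOCK_EXTENSION",
--         "NEED_PREVIOUS_CHAMBER_MEMORY",
--         "UNKNOWN",
--     )
--     rank = {p: i for i, p in enumerate(priority)}
--     best = None
--     for p in patterns:
--         r = rank.get(p)
--         if r is not None and (best is None or r < best):
--             best = r
--     return priority[best] if best is not None else "UNKNOWN"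
-- ===== Notes on version B (the rewrite author's own statement) =====
-- stated objective: idiomatic
-- what changed: Instead of scanning the patterns list once per priority string (up to 11 membership scans), B builds a rank dict once and makes a single pass over patterns keeping the minimum rank seen, then indexes the priority tuple.
import Mathlib
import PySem

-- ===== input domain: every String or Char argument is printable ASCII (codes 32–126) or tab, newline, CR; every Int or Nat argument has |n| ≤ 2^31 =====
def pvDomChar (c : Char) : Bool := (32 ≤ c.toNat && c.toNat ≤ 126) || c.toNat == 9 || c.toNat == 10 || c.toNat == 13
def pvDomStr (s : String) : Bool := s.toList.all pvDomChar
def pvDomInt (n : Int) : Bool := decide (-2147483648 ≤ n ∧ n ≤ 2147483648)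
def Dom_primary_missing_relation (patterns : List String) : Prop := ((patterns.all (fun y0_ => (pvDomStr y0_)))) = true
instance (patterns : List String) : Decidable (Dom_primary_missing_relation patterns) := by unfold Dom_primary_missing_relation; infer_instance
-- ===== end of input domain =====

-- B replaces A's 11 membership scans of `patterns` (one per priority string) by one pass over
-- `patterns` keeping the minimum rank from a rank table; same return value, stated and proved below.


-- the priority tuple, shared literal of both Pythons
def pvPrio : List String :=
  ["NEED_LARGER_CANDIDATE_BOUND", "NEED_TRUE_BOUNDARY_CLOSURE", "NEED_MULTI_HOLE_CLOSURE",
   "NEED_UNRESOLVED_LATER_DOMINATION", "NEED_POST_BOUNDARY_ABSORPTION",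
   "NEED_FALSE_RESOLVED_SURVIVOR_REJECTION", "NEED_RESET_DISCRIMINATOR",
   "NEED_CARRIER_LOCK_EXTENSION", "NEED_HIGHER_DIVISOR_LOCK_EXTENSION",
   "NEED_PREVIOUS_CHAMBER_MEMORY", "UNKNOWN"]

-- ===== PORT A =====
-- A's `for pattern in priority: if pattern in patterns: return pattern`
def pvFindFirst : List String → List String → String
  | [], _ => "UNKNOWN"
  | q :: qs, ps => if ps.contains q then q else pvFindFirst qs ps

def primary_missing_relation (patterns : List String) : String :=
  pvFindFirst pvPrio patterns

-- ===== PORT B =====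
-- B's `rank = {p: i for i, p in enumerate(priority)}`
def pvRank : PySem.Dict String Int :=
  PySem.Dict.ofList ((PySem.List.enumerate pvPrio).map (fun ip => (ip.2, ip.1)))

-- B's loop body: `r = rank.get(p); if r is not None and (best is None or r < best): best = r`
def pvStep (best : Option Int) (p : String) : Option Int :=
  match pvRank.get? p with
  | none => best
  | some r =>
    match best with
    | none => some r
    | some b => if r < b then some r else best

def primary_missing_relation_alt (patterns : List String) : String :=
  match patterns.foldl pvStep none with
  | some b => (PySem.List.pyGet? pvPrio b).getD "UNKNOWN"  -- priority[best]; index always in range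
  | none => "UNKNOWN"

-- ===== PRECONDITION & SPEC =====
def Spec_primary_missing_relation (patterns : List String) (out : String) : Prop := out = primary_missing_relation_alt patterns
instance (patterns : List String) (out : String) : Decidable (Spec_primary_missing_relation patterns out) := by unfold Spec_primary_missing_relation; infer_instance

-- ===== CLAIM (what is proved, stated in full; the proofs are below) =====
def Claim_equal_primary_missing_relation : Prop := ∀ (patterns : List String), Dom_primary_missing_relation patterns → Spec_primary_missing_relation patterns (primary_missing_relation patterns)

-- ===== LEMMAS AND PROOFS =====

-- pvRank as a literal dict
def pvRankLit : PySem.Dict String Int := PySem.Dict.mk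
  [("NEED_LARGER_CANDIDATE_BOUND", 0), ("NEED_TRUE_BOUNDARY_CLOSURE", 1),
   ("NEED_MULTI_HOLE_CLOSURE", 2), ("NEED_UNRESOLVED_LATER_DOMINATION", 3),
   ("NEED_POST_BOUNDARY_ABSORPTION", 4), ("NEED_FALSE_RESOLVED_SURVIVOR_REJECTION", 5),
   ("NEED_RESET_DISCRIMINATOR", 6), ("NEED_CARRIER_LOCK_EXTENSION", 7),
   ("NEED_HIGHER_DIVISOR_LOCK_EXTENSION", 8), ("NEED_PREVIOUS_CHAMBER_MEMORY", 9),
   ("UNKNOWN", 10)]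

theorem pvRank_eq_lit : pvRank = pvRankLit := by decide

-- the rank of p as a Nat, 11 = absent
def pvRk (p : String) : Nat :=
  match pvRank.get? p with
  | some r => r.toNat
  | none => 11

def pvN (ps : List String) : Nat := ps.foldl (fun n p => min n (pvRk p)) 11

def pvEmbed (k : Nat) : Option Int := if k < 11 then some (k : Int) else none

theorem pvRank_some {p : String} {r : Int} (h : pvRank.get? p = some r) :
    ∃ j : Nat, j < 11 ∧ r = (j : Int) ∧ pvPrio.getD j "" = p := by
  have hm := PySem.Dict.mem_items_of_get?_eq_some pvRank h
  rw [pvRank_eq_lit] at hm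
  simp [pvRankLit] at hm
  rcases hm with ⟨h1, h2⟩|⟨h1, h2⟩|⟨h1, h2⟩|⟨h1, h2⟩|⟨h1, h2⟩|⟨h1, h2⟩|⟨h1, h2⟩|⟨h1, h2⟩|⟨h1, h2⟩|⟨h1, h2⟩|⟨h1, h2⟩
  · exact ⟨0, by norm_num, by simp [h2], by simp [pvPrio, h1]⟩
  · exact ⟨1, by norm_num, by simp [h2], by simp [pvPrio, h1]⟩
  · exact ⟨2, by norm_num, by simp [h2], by simp [pvPrio, h1]⟩
  · exact ⟨3, by norm_num, by simp [h2], by simp [pvPrio, h1]⟩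
  · exact ⟨4, by norm_num, by simp [h2], by simp [pvPrio, h1]⟩
  · exact ⟨5, by norm_num, by simp [h2], by simp [pvPrio, h1]⟩
  · exact ⟨6, by norm_num, by simp [h2], by simp [pvPrio, h1]⟩
  · exact ⟨7, by norm_num, by simp [h2], by simp [pvPrio, h1]⟩
  · exact ⟨8, by norm_num, by simp [h2], by simp [pvPrio, h1]⟩
  · exact ⟨9, by norm_num, by simp [h2], by simp [pvPrio, h1]⟩
  · exact ⟨10, by norm_num, by simp [h2], by simp [pvPrio, h1]⟩

theorem pvRank_prio : ∀ j : Nat, j < 11 → pvRank.get? (pvPrio.getD j "") = some (j : Int) := by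
  decide

theorem pvRk_prio {j : Nat} (h : j < 11) : pvRk (pvPrio.getD j "") = j := by
  unfold pvRk
  rw [pvRank_prio j h]
  simp

theorem pvStep_embed (p : String) (k : Nat) (hk : k ≤ 11) :
    pvStep (pvEmbed k) p = pvEmbed (min k (pvRk p)) := by
  unfold pvStep pvRk
  cases h : pvRank.get? p with
  | none => simp [Nat.min_eq_left hk]
  | some r =>
    obtain ⟨j, hj, rfl, _⟩ := pvRank_some h
    simp only [Int.toNat_natCast, pvEmbed]
    by_cases hk11 : k < 11
    · simp only [if_pos hk11]
      by_cases hjk : j < k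
      · simp [Nat.min_eq_right (le_of_lt hjk), Nat.lt_of_lt_of_le hjk hk, Int.ofNat_lt.mpr hjk]
      · have : ¬ ((j : Int) < (k : Int)) := by exact_mod_cast hjk
        simp [this, Nat.min_eq_left (Nat.le_of_not_lt hjk), hk11]
    · have hk' : k = 11 := by omega
      subst hk'
      simp [Nat.min_eq_right (by omega : j ≤ 11), hj]

theorem pvFold_embed (ps : List String) : ∀ k : Nat, k ≤ 11 →
    ps.foldl pvStep (pvEmbed k) = pvEmbed (ps.foldl (fun n p => min n (pvRk p)) k) := by
  induction ps with
  | nil => intro k _; rfl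
  | cons p ps ih =>
    intro k hk
    simp only [List.foldl_cons, pvStep_embed p k hk]
    exact ih _ (le_trans (Nat.min_le_left _ _) hk)

-- pure Nat min-fold facts
theorem pvFmin_le (ps : List String) : ∀ k : Nat, ps.foldl (fun n p => min n (pvRk p)) k ≤ k := by
  induction ps with
  | nil => intro k; exact le_refl _
  | cons p ps ih =>
    intro k
    exact le_trans (ih _) (Nat.min_le_left _ _)

theorem pvFmin_le_of_mem {ps : List String} {q : String} (hq : q ∈ ps) :
    ∀ k : Nat, ps.foldl (fun n p => min n (pvRk p)) k ≤ pvRk q := by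
  induction ps with
  | nil => cases hq
  | cons p ps ih =>
    intro k
    rcases List.mem_cons.mp hq with rfl | hmem
    · exact le_trans (pvFmin_le ps _) (Nat.min_le_right _ _)
    · exact ih hmem _

theorem pvFmin_ge {ps : List String} {i : Nat} (h : ∀ p ∈ ps, i ≤ pvRk p) :
    ∀ k : Nat, i ≤ k → i ≤ ps.foldl (fun n p => min n (pvRk p)) k := by
  induction ps with
  | nil => intro k hk; exact hk
  | cons p ps ih =>
    intro k hk
    exact ih (fun p hp => h p (List.mem_cons_of_mem _ hp)) _
      (le_min hk (h p (List.mem_cons_self)))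

theorem pvPrio_len : pvPrio.length = 11 := by decide

-- main bridge: A's chain over the remaining priorities vs the global min-rank
theorem pvMain_aux : ∀ (qs pre ps : List String), pvPrio = pre ++ qs →
    (∀ q ∈ pre, ¬ ps.contains q) →
    pvFindFirst qs ps = (if pvN ps < 11 then pvPrio.getD (pvN ps) "" else "UNKNOWN") := by
  intro qs
  induction qs with
  | nil =>
    intro pre ps hsplit hpre
    have hall : ∀ p ∈ ps, 11 ≤ pvRk p := by
      intro p hp
      unfold pvRk
      cases h : pvRank.get? p with
      | none => exact le_refl _
      | some r =>
        obtain ⟨j, hj, rfl, hpj⟩ := pvRank_some h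
        exfalso
        have hmem : p ∈ pvPrio := by
          rw [← hpj]
          have : j < pvPrio.length := by rw [pvPrio_len]; exact hj
          rw [List.getD_eq_getElem _ _ this]
          exact List.getElem_mem this
        rw [hsplit, List.append_nil] at hmem
        exact hpre p hmem (by simpa [List.contains_iff_mem] using hp)
    have h11 : pvN ps = 11 :=
      le_antisymm (pvFmin_le ps 11) (pvFmin_ge hall 11 (le_refl _))
    simp [pvFindFirst, h11]
  | cons q qs ih =>
    intro pre ps hsplit hpre
    by_cases hq : ps.contains q
    · have hqi : pvPrio.getD pre.length "" = q := by
        rw [hsplit, List.getD_eq_getElem?_getD, List.getElem?_append_right (le_refl _)]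
        simp
      have hilt : pre.length < 11 := by
        have := congrArg List.length hsplit
        simp [pvPrio_len] at this
        omega
      have hqmem : q ∈ ps := by simpa [List.contains_iff_mem] using hq
      have hN : pvN ps = pre.length := by
        apply le_antisymm
        · have := pvFmin_le_of_mem hqmem 11
          rwa [← hqi, pvRk_prio hilt] at this
        · apply pvFmin_ge _ 11 (by omega)
          intro p hp
          unfold pvRk
          cases h : pvRank.get? p with
          | none => show pre.length ≤ 11; omega
          | some r =>
            obtain ⟨j, hj, rfl, hpj⟩ := pvRank_some h
            simp only [Int.toNat_natCast]
            by_contra hlt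
            have hjpre : j < pre.length := by omega
            have hppre : p ∈ pre := by
              rw [← hpj, hsplit, List.getD_append _ _ _ _ hjpre,
                List.getD_eq_getElem _ _ hjpre]
              exact List.getElem_mem hjpre
            exact hpre p hppre (by simpa [List.contains_iff_mem] using hp)
      simp only [pvFindFirst, if_pos hq, hN, if_pos hilt, hqi]
    · have hsplit' : pvPrio = (pre ++ [q]) ++ qs := by simpa using hsplit
      have hpre' : ∀ q' ∈ pre ++ [q], ¬ ps.contains q' := by
        intro q' hq'
        rcases List.mem_append.mp hq' with h | h
        · exact hpre q' h
        · simp at h; subst h; exact hq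
      rw [pvFindFirst, if_neg hq]
      exact ih (pre ++ [q]) ps hsplit' hpre'

-- rendering of pvEmbed n as B's final expression
theorem pvRender (n : Nat) :
    (match pvEmbed n with
      | some b => (PySem.List.pyGet? pvPrio b).getD "UNKNOWN"
      | none => "UNKNOWN") = (if n < 11 then pvPrio.getD n "" else "UNKNOWN") := by
  by_cases h : n < 11
  · have hlen : n < pvPrio.length := by rw [pvPrio_len]; exact h
    simp [pvEmbed, h, List.getElem?_eq_getElem hlen]
  · simp [pvEmbed, h]

theorem pvFold_none (ps : List String) : ps.foldl pvStep none = pvEmbed (pvN ps) := by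
  rw [show (none : Option Int) = pvEmbed 11 from by simp [pvEmbed]]
  exact pvFold_embed ps 11 (le_refl _)

-- ===== VERDICT (by name: the statement is the Claim_ definition above) =====
theorem primary_missing_relation_spec : Claim_equal_primary_missing_relation := by
  unfold Claim_equal_primary_missing_relation
  intro ps _
  unfold Spec_primary_missing_relation primary_missing_relation primary_missing_relation_alt
  rw [pvFold_none, pvRender (pvN ps)]
  exact pvMain_aux pvPrio [] ps (by simp) (by simp)
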